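-- pv_equiv track=rewrite | github.com/blazejosinski/advent-of-code | day24.py | tile_coordinate
-- ===== SOURCE A (Python) =====
-- moves = {
--   "e": [0, 1],
--   "se": [-1, 1],
--   "sw": [-1, 0],
--   "w": [0, -1],
--   "nw": [1, -1],
--   "ne": [1, 0],
-- }
--
-- def tile_coordinate(steps):
--   cur = [0,0]
--   inx = 0
--   while inx < len(steps):
--     if steps[inx:inx+1] in moves:
--       move = moves[steps[inx:inx+1]]
--       inx += 1
--     else:
--       move = moves[steps[inx:inx+2]]
--       inx += 2
--     cur[0] += move[0]
--     cur[1] += move[1]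
--   return cur[0], cur[1]
-- ===== SOURCE B (Python) =====
-- moves = {
--   "e": [0, 1],
--   "se": [-1, 1],
--   "sw": [-1, 0],
--   "w": [0, -1],
--   "nw": [1, -1],
--   "ne": [1, 0],
-- }
--
-- def tile_coordinate(steps):
--   x = 0
--   y = 0
--   prefix = ""
--   for c in steps:
--     if prefix:
--       dx, dy = moves[prefix + c]
--       prefix = ""
--     elif c in moves:
--       dx, dy = moves[c]
--     else:
--       prefix = c
--       continue
--     x += dx
--     y += dy
--   if prefix:
--     dx, dy = moves[prefix]
--     x += dx
--     y += dy
--   return (x, y)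
-- ===== Notes on version B (the rewrite author's own statement) =====
-- stated objective: alternative
-- what changed: B replaces A's index-based while loop with lookahead slicing by a single char-by-char pass that keeps a pending one-character prefix and resolves each move when its last character arrives.
import Mathlib
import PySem

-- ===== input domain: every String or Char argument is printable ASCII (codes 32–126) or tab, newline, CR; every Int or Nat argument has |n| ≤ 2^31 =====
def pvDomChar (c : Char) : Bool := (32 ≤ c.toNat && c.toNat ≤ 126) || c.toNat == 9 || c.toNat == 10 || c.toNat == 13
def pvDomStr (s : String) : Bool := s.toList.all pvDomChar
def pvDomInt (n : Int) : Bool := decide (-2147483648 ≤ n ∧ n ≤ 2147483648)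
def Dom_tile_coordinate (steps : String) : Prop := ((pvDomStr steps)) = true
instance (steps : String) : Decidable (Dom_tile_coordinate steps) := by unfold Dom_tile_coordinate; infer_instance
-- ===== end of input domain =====

-- B replaces A's index-based while loop with slicing lookahead by a single char-by-char
-- pass keeping a pending one-character prefix; same cost, different decomposition.

-- the module-level dict `moves`
def pvMoves : PySem.Dict String (Int × Int) :=
  PySem.Dict.ofList [("e", (0, 1)), ("se", (-1, 1)), ("sw", (-1, 0)), ("w", (0, -1)), ("nw", (1, -1)), ("ne", (1, 0))]

-- ===== PORT A =====
-- A's while loop over the index `inx`, ported as recursion on the chars not yet consumed;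
-- steps[inx:inx+1] is String.ofList [c], steps[inx:inx+2] is String.ofList (c :: rest.take 1).
-- Where Python's `moves[...]` would raise KeyError (excluded by Pre_), getD supplies (0,0).
def tcALoop : List Char → Int × Int → Int × Int
  | [], cur => cur
  | c :: rest, cur =>
    if (PySem.Dict.get? pvMoves (String.ofList [c])).isSome then
      -- `steps[inx:inx+1] in moves`; inx += 1
      let m := PySem.Dict.getD pvMoves (String.ofList [c]) (0, 0)
      tcALoop rest (cur.1 + m.1, cur.2 + m.2)
    else
      -- move = moves[steps[inx:inx+2]]; inx += 2
      let m := PySem.Dict.getD pvMoves (String.ofList (c :: rest.take 1)) (0, 0)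
      tcALoop (rest.drop 1) (cur.1 + m.1, cur.2 + m.2)
termination_by l _ => l.length
decreasing_by all_goals simp

def tile_coordinate (steps : String) : Int × Int :=
  tcALoop steps.toList (0, 0)

-- ===== PORT B =====
-- one pass over the chars with accumulators x, y and a pending one-char prefix string
def tcBLoop : List Char → String → Int → Int → Int × Int
  | [], prefix_, x, y =>
    if prefix_ ≠ "" then
      -- post-loop: a dangling prefix is looked up on its own (KeyError in Python, outside Pre_)
      let m := PySem.Dict.getD pvMoves prefix_ (0, 0)
      (x + m.1, y + m.2)
    else (x, y)
  | c :: rest, prefix_, x, y =>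
    if prefix_ ≠ "" then
      let m := PySem.Dict.getD pvMoves (prefix_ ++ String.ofList [c]) (0, 0)
      tcBLoop rest "" (x + m.1) (y + m.2)
    else if (PySem.Dict.get? pvMoves (String.ofList [c])).isSome then
      let m := PySem.Dict.getD pvMoves (String.ofList [c]) (0, 0)
      tcBLoop rest "" (x + m.1) (y + m.2)
    else
      tcBLoop rest (String.ofList [c]) x y

def tile_coordinate_alt (steps : String) : Int × Int :=
  tcBLoop steps.toList "" 0 0

-- ===== PRECONDITION & SPEC =====
-- grammar of well-formed direction strings: (e|w|se|sw|ne|nw)*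
def pvValid : List Char → Bool
  | [] => true
  | 'e' :: r => pvValid r
  | 'w' :: r => pvValid r
  | 's' :: 'e' :: r => pvValid r
  | 's' :: 'w' :: r => pvValid r
  | 'n' :: 'e' :: r => pvValid r
  | 'n' :: 'w' :: r => pvValid r
  | _ => false

-- Pre_ excludes exactly the malformed direction strings, on which Python A raises KeyError.
def Pre_tile_coordinate (steps : String) : Prop := pvValid steps.toList = true
instance (steps : String) : Decidable (Pre_tile_coordinate steps) := by
  unfold Pre_tile_coordinate; infer_instance

def pvWitness_tile_coordinate : String := "esenwwsw"

def Spec_tile_coordinate (steps : String) (out : Int × Int) : Prop := out = tile_coordinate_alt steps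
instance (steps : String) (out : Int × Int) : Decidable (Spec_tile_coordinate steps out) := by unfold Spec_tile_coordinate; infer_instance

-- ===== CLAIM (what is proved, stated in full; the proofs are below) =====
def Claim_equal_tile_coordinate : Prop := ∀ (steps : String), Dom_tile_coordinate steps → Pre_tile_coordinate steps → Spec_tile_coordinate steps (tile_coordinate steps)

-- ===== LEMMAS AND PROOFS =====
-- the ten closed-form lookup facts about the `moves` dict used by the induction
theorem pvLook : (PySem.Dict.get? pvMoves "e").isSome = true ∧ (PySem.Dict.get? pvMoves "w").isSome = true ∧
    (PySem.Dict.get? pvMoves "s").isSome = false ∧ (PySem.Dict.get? pvMoves "n").isSome = false ∧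
    PySem.Dict.getD pvMoves "e" (0,0) = (0,1) ∧ PySem.Dict.getD pvMoves "w" (0,0) = (0,-1) ∧
    PySem.Dict.getD pvMoves "se" (0,0) = (-1,1) ∧ PySem.Dict.getD pvMoves "sw" (0,0) = (-1,0) ∧
    PySem.Dict.getD pvMoves "ne" (0,0) = (1,0) ∧ PySem.Dict.getD pvMoves "nw" (0,0) = (1,-1) := by decide

-- loop invariant: on a well-formed tail, A's loop from (x, y) equals B's loop with no pending prefix
theorem tc_loop_eq : ∀ (l : List Char) (x y : Int), pvValid l = true →
    tcALoop l (x, y) = tcBLoop l "" x y := by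
  intro l
  obtain ⟨hE, hW, hS, hN, gE, gW, gSE, gSW, gNE, gNW⟩ := pvLook
  induction l using pvValid.induct with
  | case1 => intro x y _; simp [tcALoop, tcBLoop]
  | case2 r ih =>
    intro x y h
    simp only [pvValid] at h
    simp [tcALoop, tcBLoop, hE, gE]
    exact ih _ _ h
  | case3 r ih =>
    intro x y h
    simp only [pvValid] at h
    simp [tcALoop, tcBLoop, hW, gW]
    exact ih _ _ h
  | case4 r ih =>
    intro x y h
    simp only [pvValid] at h
    simp [tcALoop, tcBLoop, hS, gSE]
    exact ih _ _ h
  | case5 r ih =>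
    intro x y h
    simp only [pvValid] at h
    simp [tcALoop, tcBLoop, hS, gSW]
    exact ih _ _ h
  | case6 r ih =>
    intro x y h
    simp only [pvValid] at h
    simp [tcALoop, tcBLoop, hN, gNE]
    exact ih _ _ h
  | case7 r ih =>
    intro x y h
    simp only [pvValid] at h
    simp [tcALoop, tcBLoop, hN, gNW]
    exact ih _ _ h
  | case8 a h0 h1 h2 h3 h4 h5 h6 =>
    intro x y h
    exfalso
    rw [pvValid.eq_def] at h
    split at h
    · exact h0 rfl
    · exact h1 _ rfl
    · exact h2 _ rfl
    · exact h3 _ rfl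
    · exact h4 _ rfl
    · exact h5 _ rfl
    · exact h6 _ rfl
    · simp at h

-- ===== VERDICT (by name: the statement is the Claim_ definition above) =====
theorem tile_coordinate_spec : Claim_equal_tile_coordinate := by
  intro steps _ hpre
  unfold Spec_tile_coordinate tile_coordinate tile_coordinate_alt
  exact tc_loop_eq steps.toList 0 0 hpre
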